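-- pv_equiv track=rewrite | github.com/artempenteskul/tasks | python/directions_reduction.py | direction_reduction
-- ===== SOURCE A (Python) =====
-- opposite = {
--     'NORTH': 'SOUTH',
--     'SOUTH': 'NORTH',
--     'WEST': 'EAST',
--     'EAST': 'WEST',
-- }
--
-- def direction_reduction(plan: list):
--     new_plan = []
--     for direction in plan:
--         if new_plan and new_plan[-1] == opposite[direction]:
--             new_plan.pop()
--         else:
--             new_plan.append(direction)
--     return new_plan
-- ===== SOURCE B (Python) =====
-- opposite = {
--     'NORTH': 'SOUTH',
--     'SOUTH': 'NORTH',
--     'WEST': 'EAST',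
--     'EAST': 'WEST',
-- }
--
-- def direction_reduction(plan: list):
--     result = list(plan)
--     changed = True
--     while changed:
--         changed = False
--         out = []
--         i = 0
--         while i < len(result):
--             if i + 1 < len(result) and opposite.get(result[i + 1]) == result[i]:
--                 i += 2
--                 changed = True
--             else:
--                 out.append(result[i])
--                 i += 1
--         result = out
--     return result
-- ===== Notes on version B (the rewrite author's own statement) =====
-- stated objective: alternative
-- what changed: Replaced the single-pass last-in-first-out stack (push/pop against the previous kept move) by a repeated-pass fixpoint reduction that rescans the whole list, dropping every adjacent opposite pair, until a full pass removes nothing.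
-- outside the precondition, e.g. on direction_reduction(['FOO', 'NORTH']): A returns ['FOO', 'NORTH'], B returns ['FOO', 'NORTH']
import Mathlib
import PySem

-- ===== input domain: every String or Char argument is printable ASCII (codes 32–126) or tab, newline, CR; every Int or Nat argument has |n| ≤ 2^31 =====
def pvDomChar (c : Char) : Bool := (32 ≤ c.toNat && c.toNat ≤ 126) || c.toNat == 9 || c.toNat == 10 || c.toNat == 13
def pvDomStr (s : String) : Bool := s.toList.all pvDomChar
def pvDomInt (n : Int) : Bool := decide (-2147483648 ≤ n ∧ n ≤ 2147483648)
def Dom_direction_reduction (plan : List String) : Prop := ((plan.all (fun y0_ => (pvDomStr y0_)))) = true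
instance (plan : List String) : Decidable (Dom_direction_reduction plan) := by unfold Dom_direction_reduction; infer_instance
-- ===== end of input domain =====

-- B replaces A's one-pass stack by repeated whole-list adjacent-pair cancellation passes to a
-- fixpoint (a genuinely different, O(n^2), reduction strategy); return values proved equal on Pre_.

-- ===== PORT A =====
-- the module-level `opposite` dict
def pyOpposite : PySem.Dict String String :=
  PySem.Dict.ofList [("NORTH", "SOUTH"), ("SOUTH", "NORTH"), ("WEST", "EAST"), ("EAST", "WEST")]

-- loop body of A: `if new_plan and new_plan[-1] == opposite[direction]: pop else: append`.
-- Where Python's `opposite[direction]` would raise KeyError (excluded by Pre_), get? is none,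
-- the equality with `some last` is false and the port appends.
def stepA (np : List String) (d : String) : List String :=
  if np ≠ [] ∧ np.getLast? = PySem.Dict.get? pyOpposite d then np.dropLast else np ++ [d]

def direction_reduction (plan : List String) : List String :=
  plan.foldl stepA []

-- ===== PORT B =====
-- one left-to-right pass of Source B's inner while-loop: drop each adjacent pair (x, y) with
-- opposite.get(y) == x; the Bool is the `changed` flag of that pass.
def onePassB : List String → List String × Bool
  | x :: y :: rest =>
      if PySem.Dict.get? pyOpposite y = some x then
        ((onePassB rest).1, true)
      else
        let p := onePassB (y :: rest)
        (x :: p.1, p.2)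
  | l => (l, false)

-- termination helpers for the outer `while changed` loop
theorem onePassB_len : ∀ l : List String, (onePassB l).1.length ≤ l.length := by
  intro l
  induction l using onePassB.induct with
  | case1 x y rest h ih => simp only [onePassB, if_pos h, List.length_cons]; omega
  | case2 x y rest h ih =>
      simp only [onePassB, if_neg h, List.length_cons] at ih ⊢
      omega
  | case3 l h1 => simp [onePassB]

theorem onePassB_true_length : ∀ l : List String, (onePassB l).2 = true → (onePassB l).1.length < l.length := by
  intro l
  induction l using onePassB.induct with
  | case1 x y rest h ih =>
      intro _
      simp only [onePassB, if_pos h, List.length_cons]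
      have := onePassB_len rest
      omega
  | case2 x y rest h ih =>
      intro hc
      simp only [onePassB, if_neg h] at hc ⊢
      have := ih hc
      simp only [List.length_cons] at *
      omega
  | case3 l h1 =>
      intro hc
      simp only [onePassB] at hc
      cases l with
      | nil => simp at hc
      | cons a t => cases t with
        | nil => simp at hc
        | cons b r => exact absurd rfl (h1 a b r)

-- outer `while changed` loop of Source B
def reduceFixB (l : List String) : List String :=
  if h : (onePassB l).2 = true then reduceFixB (onePassB l).1 else (onePassB l).1
  termination_by l.length
  decreasing_by exact onePassB_true_length l h

def direction_reduction_alt (plan : List String) : List String :=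
  reduceFixB plan

-- ===== PRECONDITION & SPEC =====
-- Pre_ excludes plans of length ≥ 2 containing a word other than the four directions: on such plans
-- A raises KeyError whenever that word is scanned while A's stack is non-empty, and whether that
-- happens depends on the running stack state, which is not a closed-form condition on the input
-- (on the excluded plans where A does return, e.g. ['FOO','NORTH'], B returns the same value).
def Pre_direction_reduction (plan : List String) : Prop :=
  plan.length ≤ 1 ∨ ∀ s ∈ plan, s = "NORTH" ∨ s = "SOUTH" ∨ s = "WEST" ∨ s = "EAST"
instance (plan : List String) : Decidable (Pre_direction_reduction plan) := by
  unfold Pre_direction_reduction; infer_instance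

def pvWitness_direction_reduction : List String := ["NORTH", "WEST", "EAST", "SOUTH", "NORTH"]

def Spec_direction_reduction (plan : List String) (out : List String) : Prop := out = direction_reduction_alt plan
instance (plan : List String) (out : List String) : Decidable (Spec_direction_reduction plan out) := by unfold Spec_direction_reduction; infer_instance

-- ===== CLAIM (what is proved, stated in full; the proofs are below) =====
def Claim_equal_direction_reduction : Prop := ∀ (plan : List String), Dom_direction_reduction plan → Pre_direction_reduction plan → Spec_direction_reduction plan (direction_reduction plan)

-- ===== LEMMAS AND PROOFS =====

-- `l` has no adjacent cancellable pair (x, y) with opposite.get(y) = some x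
def irredB : List String → Bool
  | x :: y :: rest => !(PySem.Dict.get? pyOpposite y == some x) && irredB (y :: rest)
  | _ => true

theorem opp_get (y : String) : PySem.Dict.get? pyOpposite y =
    if "NORTH" == y then some "SOUTH" else if "SOUTH" == y then some "NORTH"
    else if "WEST" == y then some "EAST" else if "EAST" == y then some "WEST" else none := by
  rw [show pyOpposite = PySem.Dict.mk [("NORTH","SOUTH"),("SOUTH","NORTH"),("WEST","EAST"),("EAST","WEST")] from rfl]
  simp only [PySem.Dict.get?]
  by_cases h1 : ("NORTH":String) == y <;> by_cases h2 : ("SOUTH":String) == y <;>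
    by_cases h3 : ("WEST":String) == y <;> by_cases h4 : ("EAST":String) == y <;>
    simp [List.find?, h1, h2, h3, h4]

theorem opp_symm (x y : String) (h : PySem.Dict.get? pyOpposite y = some x) :
    PySem.Dict.get? pyOpposite x = some y := by
  rw [opp_get] at h
  split_ifs at h with h1 h2 h3 h4 <;> simp_all <;> subst_vars <;> rfl

theorem irred_snoc (l : List String) (d : String) :
    irredB (l ++ [d]) = true ↔
      irredB l = true ∧ ∀ a, l.getLast? = some a → PySem.Dict.get? pyOpposite d ≠ some a := by
  induction l using irredB.induct with
  | case1 x y rest ih =>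
      simp only [List.cons_append, irredB, Bool.and_eq_true, Bool.not_eq_eq_eq_not, Bool.not_true,
        beq_eq_false_iff_ne, ne_eq] at *
      rw [List.getLast?_cons_cons]
      constructor
      · rintro ⟨hxy, hr⟩
        obtain ⟨h1, h2⟩ := ih.mp hr
        exact ⟨⟨hxy, h1⟩, h2⟩
      · rintro ⟨⟨hxy, h1⟩, h2⟩
        exact ⟨hxy, ih.mpr ⟨h1, h2⟩⟩
  | case2 l hno =>
      cases l with
      | nil => simp [irredB]
      | cons a t =>
        cases t with
        | nil =>
            simp only [List.cons_append, List.nil_append, irredB, Bool.and_eq_true,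
              Bool.not_eq_eq_eq_not, Bool.not_true, beq_eq_false_iff_ne, ne_eq, List.getLast?_singleton]
            constructor
            · rintro ⟨h1, _⟩
              exact ⟨trivial, fun b hb => by simp at hb; subst hb; exact h1⟩
            · rintro ⟨_, h2⟩
              exact ⟨h2 a rfl, trivial⟩
        | cons b r => exact absurd rfl (hno a b r)

-- L1: on an irreducible stack, pushing x then y with opposite.get(y) = some x restores the stack
theorem stepA_cancel (st : List String) (x y : String)
    (hirr : irredB st = true) (h : PySem.Dict.get? pyOpposite y = some x) :
    stepA (stepA st x) y = st := by
  have hxy : PySem.Dict.get? pyOpposite x = some y := opp_symm x y h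
  unfold stepA
  split_ifs with h1 h2 h3
  · -- pop then pop: the two last stack entries would be a cancellable pair, contradicting hirr
    exfalso
    obtain ⟨hne, hlast⟩ := h1
    rw [hxy] at hlast
    obtain ⟨u, rfl⟩ := List.getLast?_eq_some_iff.mp hlast
    rw [List.dropLast_concat] at h2
    obtain ⟨hu, hulast⟩ := h2
    rw [h] at hulast
    exact ((irred_snoc u y).mp hirr).2 x hulast h
  · -- pop then push restores the stack
    obtain ⟨hne, hlast⟩ := h1
    rw [hxy] at hlast
    obtain ⟨u, rfl⟩ := List.getLast?_eq_some_iff.mp hlast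
    rw [List.dropLast_concat]
  · -- push then pop restores the stack
    exact List.dropLast_concat
  · -- push then push cannot happen: the just-pushed x is the opposite of y
    exfalso
    exact h3 ⟨by simp, by simp [h]⟩

-- L2: stepA preserves irreducibility of the stack
theorem stepA_irred (st : List String) (d : String) (hirr : irredB st = true) :
    irredB (stepA st d) = true := by
  unfold stepA
  split_ifs with h1
  · obtain ⟨hne, _⟩ := h1
    obtain ⟨u, a, rfl⟩ := st.eq_nil_or_concat.resolve_left hne
    rw [List.concat_eq_append] at hirr ⊢
    rw [List.dropLast_concat]
    exact ((irred_snoc u a).mp hirr).1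
  · refine (irred_snoc st d).mpr ⟨hirr, fun a ha hc => h1 ⟨?_, by rw [ha, hc]⟩⟩
    intro hnil
    rw [hnil] at ha
    simp at ha

-- a pass that reports no change returned its input unchanged, and the input is irreducible
theorem onePassB_false : ∀ l : List String, (onePassB l).2 = false →
    (onePassB l).1 = l ∧ irredB l = true := by
  intro l
  induction l using onePassB.induct with
  | case1 x y rest h ih => intro hf; simp [onePassB, if_pos h] at hf
  | case2 x y rest h ih =>
      intro hf
      simp only [onePassB, if_neg h] at hf ⊢
      obtain ⟨h1, h2⟩ := ih hf
      refine ⟨by rw [h1], ?_⟩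
      simp only [irredB, Bool.and_eq_true, Bool.not_eq_eq_eq_not, Bool.not_true,
        beq_eq_false_iff_ne, ne_eq]
      exact ⟨h, h2⟩
  | case3 l hno =>
      intro _
      cases l with
      | nil => exact ⟨rfl, rfl⟩
      | cons a t =>
        cases t with
        | nil => exact ⟨rfl, rfl⟩
        | cons b r => exact absurd rfl (hno a b r)

-- L3: one cancellation pass does not change A's fold result (from an irreducible start state)
theorem foldl_onePass : ∀ l st : List String, irredB st = true →
    List.foldl stepA st l = List.foldl stepA st (onePassB l).1 := by
  intro l
  induction l using onePassB.induct with
  | case1 x y rest h ih =>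
      intro st hirr
      simp only [onePassB, if_pos h, List.foldl_cons]
      rw [stepA_cancel st x y hirr h]
      exact ih st hirr
  | case2 x y rest h ih =>
      intro st hirr
      simp only [onePassB, if_neg h, List.foldl_cons]
      exact ih (stepA st x) (stepA_irred st x hirr)
  | case3 l hno =>
      intro st _
      cases l with
      | nil => rfl
      | cons a t =>
        cases t with
        | nil => rfl
        | cons b r => exact absurd rfl (hno a b r)

-- L4: A's fold is the identity on irreducible lists
theorem foldl_irred : ∀ l : List String, irredB l = true → List.foldl stepA [] l = l := by
  intro l
  induction l using List.reverseRecOn with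
  | nil => intro _; rfl
  | append_singleton m d ih =>
      intro hirr
      obtain ⟨h1, h2⟩ := (irred_snoc m d).mp hirr
      rw [List.foldl_append, ih h1]
      simp only [List.foldl_cons, List.foldl_nil]
      unfold stepA
      rw [if_neg]
      rintro ⟨hne, hlast⟩
      cases hl : m.getLast? with
      | none => exact hne (by simpa using hl)
      | some a =>
          rw [hl] at hlast
          exact h2 a hl hlast.symm

theorem main_eq (l : List String) : List.foldl stepA [] l = reduceFixB l := by
  induction l using reduceFixB.induct with
  | case1 l h ih =>
      rw [foldl_onePass l [] rfl, ih]
      conv_rhs => rw [reduceFixB]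
      rw [dif_pos h]
  | case2 l h =>
      have hf := onePassB_false l (by simpa using h)
      conv_rhs => rw [reduceFixB]
      rw [dif_neg h, hf.1]
      exact foldl_irred l hf.2

-- ===== VERDICT (by name: the statement is the Claim_ definition above) =====
theorem direction_reduction_spec : Claim_equal_direction_reduction := by
  intro plan _ _
  unfold Spec_direction_reduction direction_reduction direction_reduction_alt
  exact main_eq plan
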